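-- pv_equiv track=rewrite | github.com/mysticflounder/modular-schur | scripts/schur_mod.py | prime_power_data
-- ===== SOURCE A (Python) =====
-- def prime_power_data(m: int) -> tuple[int, int] | None:
--     if m < 2:
--         return None
--     for p in range(2, m + 1):
--         if m % p != 0:
--             continue
--         exponent = 0
--         value = m
--         while value % p == 0:
--             value //= p
--             exponent += 1
--         if value == 1:
--             is_prime = True
--             for q in range(2, int(p**0.5) + 1):
--                 if p % q == 0:
--                     is_prime = False
--                     break
--             if is_prime:
--                 return p, exponent
--     return None
-- ===== SOURCE B (Python) =====
-- def prime_power_data(m: int) -> tuple[int, int] | None: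
--     if m < 2:
--         return None
--     p = None
--     d = 2
--     while d * d <= m:
--         if m % d == 0:
--             p = d
--             break
--         d += 1
--     if p is None:
--         # no divisor up to sqrt(m): m itself is prime
--         return m, 1
--     exponent = 0
--     value = m
--     while value % p == 0:
--         value //= p
--         exponent += 1
--     return (p, exponent) if value == 1 else None
-- ===== Notes on version B (the rewrite author's own statement) =====
-- stated objective: faster
-- what changed: B trial-divides only up to sqrt(m) to find the smallest prime factor (falling back to m being prime), then divides it out once, instead of A's scan of every p up to m with a redundant primality re-check.
import Mathlib
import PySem

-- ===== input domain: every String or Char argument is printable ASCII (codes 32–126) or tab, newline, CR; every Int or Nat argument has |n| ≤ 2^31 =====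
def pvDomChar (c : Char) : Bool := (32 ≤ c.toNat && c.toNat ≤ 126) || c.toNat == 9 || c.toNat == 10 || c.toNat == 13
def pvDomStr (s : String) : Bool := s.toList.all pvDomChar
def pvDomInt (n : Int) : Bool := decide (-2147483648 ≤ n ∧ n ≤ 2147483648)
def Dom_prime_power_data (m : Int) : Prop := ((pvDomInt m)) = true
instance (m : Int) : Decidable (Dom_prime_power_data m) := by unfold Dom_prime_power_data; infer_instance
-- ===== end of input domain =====

-- B replaces A's O(m) scan of every candidate p by trial division up to sqrt(m); same return value.

-- ===== PORT A =====
-- inner 'while value % p == 0: value //= p; exponent += 1'; fuel-bounded (value starts at m and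
-- strictly decreases while ≥ 1, so fuel m.toNat always suffices on the inputs A is run on)
def pvStripA (p : Int) : Nat → Int → Int → Int × Int
  | 0, value, exponent => (value, exponent)
  | f + 1, value, exponent =>
      if PySem.Int.mod value p = 0 then
        pvStripA p f (PySem.Int.floordiv value p) (exponent + 1)
      else (value, exponent)

-- 'for q in range(2, int(p**0.5) + 1): if p % q == 0: is_prime = False; break'
-- int(p**0.5) is ported as Nat.sqrt, exact for the 0 ≤ p ≤ 2^31 this loop sees (double sqrt
-- truncates to isqrt there); the flag-and-break loop is the short-circuiting List.all
def pvIsPrimeA (p : Int) : Bool :=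
  (PySem.List.pyRange 2 ((Nat.sqrt p.toNat : Int) + 1) 1).all (fun q => !(PySem.Int.mod p q == 0))

def pvLoopA (m : Int) : List Int → Option (Int × Int)
  | [] => none
  | p :: rest =>
      if PySem.Int.mod m p ≠ 0 then pvLoopA m rest
      else
        let ve := pvStripA p m.toNat m 0
        if ve.1 = 1 then
          if pvIsPrimeA p then some (p, ve.2) else pvLoopA m rest
        else pvLoopA m rest

def prime_power_data (m : Int) : Option (Int × Int) :=
  if m < 2 then none
  else pvLoopA m (PySem.List.pyRange 2 (m + 1) 1)

-- ===== PORT B =====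
-- 'while d * d <= m: if m % d == 0: p = d; break; d += 1'; fuel m.toNat suffices (d stops by sqrt m + 1)
def pvFindB (m : Int) : Nat → Int → Option Int
  | 0, _ => none
  | f + 1, d =>
      if d * d ≤ m then
        if PySem.Int.mod m d = 0 then some d else pvFindB m f (d + 1)
      else none

-- B's 'while value % p == 0' loop, as in Source B
def pvStripB (p : Int) : Nat → Int → Int → Int × Int
  | 0, value, exponent => (value, exponent)
  | f + 1, value, exponent =>
      if PySem.Int.mod value p = 0 then
        pvStripB p f (PySem.Int.floordiv value p) (exponent + 1)
      else (value, exponent)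

def prime_power_data_alt (m : Int) : Option (Int × Int) :=
  if m < 2 then none
  else
    match pvFindB m m.toNat 2 with
    | none => some (m, 1)
    | some p =>
        let ve := pvStripB p m.toNat m 0
        if ve.1 = 1 then some (p, ve.2) else none

-- ===== PRECONDITION & SPEC =====
def Spec_prime_power_data (m : Int) (out : Option (Int × Int)) : Prop := out = prime_power_data_alt m
instance (m : Int) (out : Option (Int × Int)) : Decidable (Spec_prime_power_data m out) := by unfold Spec_prime_power_data; infer_instance

-- ===== CLAIM (what is proved, stated in full; the proofs are below) =====
def Claim_equal_prime_power_data : Prop := ∀ (m : Int), Dom_prime_power_data m → Spec_prime_power_data m (prime_power_data m)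

-- ===== LEMMAS AND PROOFS =====

lemma stripB_eq_stripA (p : Int) : ∀ (f : Nat) (v e : Int), pvStripB p f v e = pvStripA p f v e := by
  intro f
  induction f with
  | zero => intro v e; rfl
  | succ f ih =>
      intro v e
      simp only [pvStripA, pvStripB]
      split_ifs with h
      · exact ih _ _
      · rfl

lemma strip_spec : ∀ (fuel p v : Nat) (e : Int), 2 ≤ p → 1 ≤ v → v ≤ fuel →
    ∃ (v' k : Nat), pvStripA (p : Int) fuel (v : Int) e = ((v' : Int), e + (k : Int)) ∧
      v = v' * p ^ k ∧ ¬ p ∣ v' ∧ 1 ≤ v' := by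
  intro fuel
  induction fuel with
  | zero => intro p v e hp hv hle; omega
  | succ f ih =>
      intro p v e hp hv hle
      simp only [pvStripA, PySem.Int.mod_natCast, PySem.Int.floordiv_natCast]
      by_cases hdvd : p ∣ v
      · have hm0 : v % p = 0 := Nat.mod_eq_zero_of_dvd hdvd
        have hcond : ((v % p : Nat) : Int) = 0 := by rw [hm0]; simp
        rw [if_pos hcond]
        have hvp1 : 1 ≤ v / p :=
          (Nat.one_le_div_iff (by omega)).mpr (Nat.le_of_dvd (by omega) hdvd)
        have hvpf : v / p ≤ f := by
          have : v / p < v := Nat.div_lt_self (by omega) (by omega)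
          omega
        obtain ⟨v', k, hrun, hfact, hndvd, hv'⟩ := ih p (v / p) (e + 1) hp hvp1 hvpf
        refine ⟨v', k + 1, ?_, ?_, hndvd, hv'⟩
        · rw [hrun]; congr 1; push_cast; ring
        · have hvv : v = (v / p) * p := (Nat.div_mul_cancel hdvd).symm
          rw [hvv, hfact, pow_succ]; ring
      · have hm0 : v % p ≠ 0 := fun h => hdvd (Nat.dvd_of_mod_eq_zero h)
        have hcond : ¬ ((v % p : Nat) : Int) = 0 := by exact_mod_cast hm0
        rw [if_neg hcond]
        exact ⟨v, 0, by norm_num, by simp, hdvd, hv⟩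

lemma isPrime_true (pN : Nat) (hp : pN.Prime) : pvIsPrimeA (pN : Int) = true := by
  unfold pvIsPrimeA
  rw [List.all_eq_true]
  intro q hq
  rw [PySem.List.mem_pyRange_one] at hq
  obtain ⟨h2, hlt⟩ := hq
  obtain ⟨qN, rfl⟩ : ∃ qN : Nat, q = (qN : Int) := ⟨q.toNat, (Int.toNat_of_nonneg (by omega)).symm⟩
  simp only [Int.toNat_natCast] at hlt ⊢
  have hq2 : 2 ≤ qN := by exact_mod_cast h2
  have hqs : qN ≤ Nat.sqrt pN := by
    have : (qN : Int) ≤ ((Nat.sqrt pN : Nat) : Int) := by omega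
    exact_mod_cast this
  have hnd : ¬ qN ∣ pN := by
    intro hdvd
    rcases hp.eq_one_or_self_of_dvd qN hdvd with h | h
    · omega
    · have hs : Nat.sqrt pN < pN := Nat.sqrt_lt_self hp.one_lt
      omega
  have hni : ¬ (qN : Int) ∣ (pN : Int) := by exact_mod_cast hnd
  simp [PySem.Int.mod_natCast, hni]

lemma isPrime_false (pN : Nat) (h2 : 2 ≤ pN) (hnp : ¬ pN.Prime) : pvIsPrimeA (pN : Int) = false := by
  unfold pvIsPrimeA
  have hqp : (pN.minFac).Prime := Nat.minFac_prime (by omega)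
  have hq2 : 2 ≤ pN.minFac := hqp.two_le
  have hsq : pN.minFac * pN.minFac ≤ pN := by
    have := Nat.minFac_sq_le_self (by omega) hnp
    nlinarith [this]
  have hqs : pN.minFac ≤ Nat.sqrt pN := Nat.le_sqrt.mpr hsq
  rw [List.all_eq_false]
  refine ⟨(pN.minFac : Int), ?_, ?_⟩
  · rw [PySem.List.mem_pyRange_one]
    simp only [Int.toNat_natCast]
    constructor
    · exact_mod_cast hq2
    · have : (pN.minFac : Int) ≤ ((Nat.sqrt pN : Nat) : Int) := by exact_mod_cast hqs
      omega
  · have hm0 : pN % pN.minFac = 0 := Nat.mod_eq_zero_of_dvd (Nat.minFac_dvd pN)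
    simp [PySem.Int.mod_natCast, hm0]

lemma loopA_skip (m : Int) (l rest : List Int) (h : ∀ p ∈ l, PySem.Int.mod m p ≠ 0) :
    pvLoopA m (l ++ rest) = pvLoopA m rest := by
  induction l with
  | nil => rfl
  | cons p l ih =>
      simp only [List.cons_append, pvLoopA]
      rw [if_pos (h p (by simp))]
      exact ih (fun q hq => h q (List.mem_cons_of_mem _ hq))

lemma loopA_none (n : Nat) (hn : 2 ≤ n) :
    ∀ (l : List Int), (∀ p ∈ l, (n.minFac : Int) < p ∧ p ≤ (n : Int)) →
      pvLoopA (n : Int) l = none := by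
  intro l
  induction l with
  | nil => intro _; rfl
  | cons p l ih =>
      intro h
      obtain ⟨hgt, hle⟩ := h p (by simp)
      have hrest := fun q hq => h q (List.mem_cons_of_mem _ hq)
      have hmf2 : 2 ≤ n.minFac := (Nat.minFac_prime (by omega)).two_le
      have hmfc : ((2 : Nat) : Int) ≤ (n.minFac : Int) := by exact_mod_cast hmf2
      obtain ⟨pN, rfl⟩ : ∃ pN : Nat, p = (pN : Int) :=
        ⟨p.toNat, (Int.toNat_of_nonneg (by omega)).symm⟩
      have hpN2 : 2 ≤ pN := by exact_mod_cast (by omega : ((2 : Nat) : Int) ≤ (pN : Int))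
      have hpNle : pN ≤ n := by exact_mod_cast hle
      have hpNgt : n.minFac < pN := by exact_mod_cast hgt
      simp only [pvLoopA]
      by_cases hdvd : pN ∣ n
      · have hm0 : n % pN = 0 := Nat.mod_eq_zero_of_dvd hdvd
        rw [if_neg (by simp [PySem.Int.mod_natCast, hm0])]
        simp only [Int.toNat_natCast]
        obtain ⟨v', k, hrun, hfact, hndvd, hv'⟩ :=
          strip_spec n pN n 0 hpN2 (by omega) le_rfl
        simp only [hrun]
        by_cases hv1 : v' = 1
        · subst hv1
          have hpow : n = pN ^ k := by simpa using hfact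
          by_cases hprime : pN.Prime
          · exfalso
            have hdvdpow : n.minFac ∣ pN ^ k := hpow ▸ Nat.minFac_dvd n
            have : n.minFac ∣ pN :=
              (Nat.minFac_prime (by omega)).dvd_of_dvd_pow hdvdpow
            have := (Nat.prime_dvd_prime_iff_eq (Nat.minFac_prime (by omega)) hprime).mp this
            omega
          · rw [if_pos (by norm_num), isPrime_false pN hpN2 hprime]
            simp only [Bool.false_eq_true, if_false]
            exact ih hrest
        · rw [if_neg (by exact_mod_cast hv1)]
          exact ih hrest
      · have hm0 : n % pN ≠ 0 := fun h0 => hdvd (Nat.dvd_of_mod_eq_zero h0)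
        have hmint : PySem.Int.mod (n : Int) (pN : Int) ≠ 0 := by
          rw [PySem.Int.mod_natCast]; exact_mod_cast hm0
        rw [if_pos hmint]
        exact ih hrest

lemma findB_none (n : Nat) (hn : 2 ≤ n) (hbig : ¬ n.minFac * n.minFac ≤ n) :
    ∀ (fuel d : Nat), 2 ≤ d → (∀ e, 2 ≤ e → e < d → ¬ e ∣ n) →
      pvFindB (n : Int) fuel (d : Int) = none := by
  intro fuel
  induction fuel with
  | zero => intro d _ _; rfl
  | succ f ih =>
      intro d hd hbelow
      simp only [pvFindB]
      by_cases hdd : (d : Int) * (d : Int) ≤ (n : Int)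
      · have hddN : d * d ≤ n := by exact_mod_cast hdd
        have hnd : ¬ d ∣ n := by
          intro hdvd
          have h1 : n.minFac ≤ d := Nat.minFac_le_of_dvd hd hdvd
          have h2 : ¬ n.minFac < d := fun hc =>
            hbelow _ (Nat.minFac_prime (by omega)).two_le hc (Nat.minFac_dvd n)
          have hde : d = n.minFac := by omega
          rw [hde] at hddN
          exact hbig hddN
        have hm0 : n % d ≠ 0 := fun h0 => hnd (Nat.dvd_of_mod_eq_zero h0)
        have hmint : PySem.Int.mod (n : Int) (d : Int) ≠ 0 := by
          rw [PySem.Int.mod_natCast]; exact_mod_cast hm0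
        rw [if_pos hdd, if_neg hmint]
        have hcast : ((d : Int) + 1) = ((d + 1 : Nat) : Int) := by push_cast; ring
        rw [hcast]
        refine ih (d + 1) (by omega) ?_
        intro e he1 he2
        by_cases hed : e = d
        · subst hed; exact hnd
        · exact hbelow e he1 (by omega)
      · rw [if_neg hdd]

lemma findB_some (n : Nat) (hn : 2 ≤ n) (hsq : n.minFac * n.minFac ≤ n) :
    ∀ (fuel d : Nat), 2 ≤ d → d ≤ n.minFac → (∀ e, 2 ≤ e → e < d → ¬ e ∣ n) →
      n.minFac + 1 - d ≤ fuel →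
      pvFindB (n : Int) fuel (d : Int) = some (n.minFac : Int) := by
  intro fuel
  induction fuel with
  | zero => intro d _ hdle _ hfuel; omega
  | succ f ih =>
      intro d hd hdle hbelow hfuel
      simp only [pvFindB]
      have hdd : (d : Int) * (d : Int) ≤ (n : Int) := by
        have : d * d ≤ n := le_trans (Nat.mul_le_mul hdle hdle) hsq
        exact_mod_cast this
      rw [if_pos hdd]
      by_cases hdm : d = n.minFac
      · subst hdm
        have hm0 : n % n.minFac = 0 := Nat.mod_eq_zero_of_dvd (Nat.minFac_dvd n)
        rw [if_pos (by rw [PySem.Int.mod_natCast]; exact_mod_cast hm0)]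
      · have hdlt : d < n.minFac := by omega
        have hnd : ¬ d ∣ n := fun hdvd => by
          have := Nat.minFac_le_of_dvd hd hdvd
          omega
        have hm0 : n % d ≠ 0 := fun h0 => hnd (Nat.dvd_of_mod_eq_zero h0)
        have hmint : PySem.Int.mod (n : Int) (d : Int) ≠ 0 := by
          rw [PySem.Int.mod_natCast]; exact_mod_cast hm0
        rw [if_neg hmint]
        have hcast : ((d : Int) + 1) = ((d + 1 : Nat) : Int) := by push_cast; ring
        rw [hcast]
        refine ih (d + 1) (by omega) (by omega) ?_ (by omega)
        intro e he1 he2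
        by_cases hed : e = d
        · subst hed; exact hnd
        · exact hbelow e he1 (by omega)

-- ===== VERDICT (by name: the statement is the Claim_ definition above) =====
theorem prime_power_data_spec : Claim_equal_prime_power_data := by
  intro m _hdom
  unfold Spec_prime_power_data prime_power_data prime_power_data_alt
  by_cases hm : m < 2
  · rw [if_pos hm, if_pos hm]
  · rw [not_lt] at hm
    obtain ⟨n, rfl⟩ : ∃ n : Nat, m = (n : Int) :=
      ⟨m.toNat, (Int.toNat_of_nonneg (by omega)).symm⟩
    have hn : 2 ≤ n := by exact_mod_cast hm
    rw [if_neg (not_lt.mpr hm), if_neg (not_lt.mpr hm)]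
    simp only [Int.toNat_natCast]
    have hp0p : (n.minFac).Prime := Nat.minFac_prime (by omega)
    have hp02 : 2 ≤ n.minFac := hp0p.two_le
    have hp0dvd : n.minFac ∣ n := Nat.minFac_dvd n
    have hp0le : n.minFac ≤ n := Nat.minFac_le (by omega)
    obtain ⟨v', k, hrun, hfact, hndvd, hv'⟩ :=
      strip_spec n n.minFac n 0 hp02 (by omega) le_rfl
    -- A side: split the range at minFac
    have hsplit : PySem.List.pyRange 2 ((n : Int) + 1) 1 =
        PySem.List.pyRange 2 (n.minFac : Int) 1 ++
          ((n.minFac : Int) :: PySem.List.pyRange ((n.minFac : Int) + 1) ((n : Int) + 1) 1) := by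
      rw [PySem.List.pyRange_one_append 2 (n.minFac : Int) ((n : Int) + 1)
            (by exact_mod_cast hp02) (by exact_mod_cast (by omega : n.minFac ≤ n + 1)),
          PySem.List.pyRange_one_cons (a := (n.minFac : Int)) (b := (n : Int) + 1)
            (by exact_mod_cast Nat.lt_succ_of_le hp0le)]
    rw [hsplit, loopA_skip _ _ _ ?smaller]
    case smaller =>
      intro p hp
      rw [PySem.List.mem_pyRange_one] at hp
      obtain ⟨h2, hlt⟩ := hp
      obtain ⟨pN, rfl⟩ : ∃ pN : Nat, p = (pN : Int) :=
        ⟨p.toNat, (Int.toNat_of_nonneg (by omega)).symm⟩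
      have hpN2 : 2 ≤ pN := by exact_mod_cast h2
      have hpNlt : pN < n.minFac := by exact_mod_cast hlt
      have hnd : ¬ pN ∣ n := fun hdvd => by
        have := Nat.minFac_le_of_dvd hpN2 hdvd
        omega
      have hm0 : n % pN ≠ 0 := fun h0 => hnd (Nat.dvd_of_mod_eq_zero h0)
      rw [PySem.Int.mod_natCast]; exact_mod_cast hm0
    simp only [pvLoopA]
    have hm0 : n % n.minFac = 0 := Nat.mod_eq_zero_of_dvd hp0dvd
    rw [if_neg (by simp [PySem.Int.mod_natCast, hm0])]
    simp only [Int.toNat_natCast, hrun]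
    by_cases hprime : n.Prime
    · -- B finds no factor ≤ √n and returns (n, 1); A returns (minFac n, k) = (n, 1)
      have hp0n : n.minFac = n := hprime.minFac_eq
      have hbig : ¬ n.minFac * n.minFac ≤ n := by rw [hp0n]; nlinarith
      have hfind : pvFindB (n : Int) n 2 = none := by
        have := findB_none n hn hbig n 2 (by omega) (by intro e he1 he2; omega)
        simpa using this
      simp only [hfind]
      -- derive v' = 1 and k = 1
      have hk0 : k ≠ 0 := by
        rintro rfl
        rw [pow_zero, mul_one] at hfact
        exact hndvd (hfact ▸ hp0dvd)
      have hnk : n.minFac ≤ n.minFac ^ k := Nat.le_self_pow hk0 _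
      have hv'1 : v' = 1 := by nlinarith [hfact, hv', hnk, hp02]
      have hk1 : k = 1 := by
        by_contra hk1
        have h2k : 2 ≤ k := by omega
        have : n.minFac ^ 2 ≤ n.minFac ^ k := Nat.pow_le_pow_right (by omega) h2k
        have h2 : n.minFac ^ 2 = n.minFac * n.minFac := by ring
        nlinarith [hfact, hv'1, hp02, hp0n]
      subst hv'1; subst hk1
      rw [if_pos (by norm_num), isPrime_true _ hp0p]
      simp [hp0n]
    · have hsq : n.minFac * n.minFac ≤ n := by
        have := Nat.minFac_sq_le_self (by omega) hprime
        nlinarith [this]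
      have hfind : pvFindB (n : Int) n 2 = some (n.minFac : Int) := by
        have := findB_some n hn hsq n 2 (by omega) hp02 (by intro e he1 he2; omega) (by omega)
        simpa using this
      simp only [hfind, stripB_eq_stripA, hrun]
      by_cases hv1 : v' = 1
      · subst hv1
        simp [isPrime_true _ hp0p]
      · rw [if_neg (by exact_mod_cast hv1), if_neg (by exact_mod_cast hv1)]
        apply loopA_none n hn
        intro p hp
        rw [PySem.List.mem_pyRange_one] at hp
        omega
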